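-- pv_equiv track=rewrite | github.com/Dibbat/BOT | mt5/.venv/mt5/pt_mt5_bridge.py | _resolve_mt5_symbol
-- ===== SOURCE A (Python) =====
-- from typing import Any, Dict, List, Optional, Set, Tuple
--
-- def _resolve_mt5_symbol(requested_symbol: str, available: List[str]) -> Optional[str]:
--     requested = str(requested_symbol or "").strip()
--     if not requested:
--         return None
--
--     requested_upper = requested.upper()
--
--     # Exact match (case-insensitive) first.
--     for s in available:
--         if s.upper() == requested_upper:
--             return s
--
--     # Common broker convention: keep base symbol and append suffix.
--     starts_with = [s for s in available if s.upper().startswith(requested_upper)]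
--     if starts_with:
--         return sorted(starts_with, key=len)[0]
--
--     # Fallback if broker prefixes group text before symbol.
--     contains = [s for s in available if requested_upper in s.upper()]
--     if contains:
--         return sorted(contains, key=len)[0]
--
--     return None
-- ===== SOURCE B (Python) =====
-- from typing import List, Optional
--
-- def _resolve_mt5_symbol(requested_symbol: str, available: List[str]) -> Optional[str]:
--     requested = str(requested_symbol or "").strip()
--     if not requested:
--         return None
--
--     requested_upper = requested.upper()
--
--     def key(s):
--         u = s.upper()
--         if u == requested_upper:
--             return (0, len(s))
--         if u.startswith(requested_upper):
--             return (1, len(s))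
--         if requested_upper in u:
--             return (2, len(s))
--         return None
--
--     # Single pass: keep the first symbol with the lexicographically
--     # smallest (rank, length); strict '<' makes the earliest winner stick.
--     best = None  # (key, symbol)
--     for s in available:
--         k = key(s)
--         if k is not None and (best is None or k < best[0]):
--             best = (k, s)
--     return best[1] if best is not None else None
-- ===== Notes on version B (the rewrite author's own statement) =====
-- stated objective: alternative
-- what changed: Replaces A's three separate scans (exact find, prefix filter + sort, substring filter + sort) with one pass that keeps the first symbol of minimal (match-rank, length) key; exact matches all share one key length, so first-wins ties reproduce A's choices.
import Mathlib
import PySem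

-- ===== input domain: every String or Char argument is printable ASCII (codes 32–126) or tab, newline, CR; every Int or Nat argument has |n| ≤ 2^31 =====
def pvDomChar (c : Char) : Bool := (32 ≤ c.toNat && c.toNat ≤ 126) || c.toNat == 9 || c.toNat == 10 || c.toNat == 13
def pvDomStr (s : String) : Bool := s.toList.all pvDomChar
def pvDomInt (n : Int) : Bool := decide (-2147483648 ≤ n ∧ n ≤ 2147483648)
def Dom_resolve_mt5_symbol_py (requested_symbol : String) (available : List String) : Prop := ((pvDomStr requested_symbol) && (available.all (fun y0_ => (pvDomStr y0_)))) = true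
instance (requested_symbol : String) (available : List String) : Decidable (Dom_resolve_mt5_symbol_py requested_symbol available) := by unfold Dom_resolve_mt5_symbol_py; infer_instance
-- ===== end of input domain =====

-- B replaces A's three scans (exact find, prefix filter + sort by length, substring filter + sort)
-- by ONE pass keeping the first symbol of minimal (match-rank, length) key; return values agree on all inputs.

-- ===== PORT A =====
-- body of _resolve_mt5_symbol after the empty-request guard: exact find, then prefix filter + stable
-- sort by len and take [0], then substring filter likewise ([0] of a nonempty list ported as head?)
def pvResolveBody (requested_upper : String) (available : List String) : Option String :=
  match available.find? (fun s => PySem.Str.upper s == requested_upper) with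
  | some s => some s
  | none =>
    let starts_with := available.filter (fun s => PySem.Str.startswith (PySem.Str.upper s) requested_upper)
    if starts_with ≠ [] then (PySem.List.sorted starts_with (fun s => PySem.Str.len s)).head?
    else
      let contains := available.filter (fun s => PySem.Str.isIn requested_upper (PySem.Str.upper s))
      if contains ≠ [] then (PySem.List.sorted contains (fun s => PySem.Str.len s)).head?
      else none

-- 'str(requested_symbol or "")' equals requested_symbol for a str argument, so only .strip() remains
def resolve_mt5_symbol_py (requested_symbol : String) (available : List String) : Option String :=
  let requested := PySem.Str.strip requested_symbol
  if requested = "" then none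
  else pvResolveBody (PySem.Str.upper requested) available

-- ===== PORT B =====
-- key(s) from Source B: None, or (rank, len(s)) with rank 0 exact / 1 prefix / 2 substring
def pvKey (requested_upper s : String) : Option (Nat × Int) :=
  let u := PySem.Str.upper s
  if u == requested_upper then some (0, PySem.Str.len s)
  else if PySem.Str.startswith u requested_upper then some (1, PySem.Str.len s)
  else if PySem.Str.isIn requested_upper u then some (2, PySem.Str.len s)
  else none

-- Python tuple comparison k < best[0] on (int, int)
def pvLexLt (a b : Nat × Int) : Bool := decide (a.1 < b.1 ∨ (a.1 = b.1 ∧ a.2 < b.2))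

-- one iteration of Source B's loop: best is None or (key, symbol)
def pvBestStep (requested_upper : String) (best : Option ((Nat × Int) × String)) (s : String) :
    Option ((Nat × Int) × String) :=
  match pvKey requested_upper s with
  | none => best
  | some k =>
    match best with
    | none => some (k, s)
    | some (bk, bs) => if pvLexLt k bk then some (k, s) else some (bk, bs)

def resolve_mt5_symbol_py_alt (requested_symbol : String) (available : List String) : Option String :=
  let requested := PySem.Str.strip requested_symbol
  if requested = "" then none
  else
    let requested_upper := PySem.Str.upper requested
    match available.foldl (pvBestStep requested_upper) none with
    | none => none
    | some (_, s) => some s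

-- ===== PRECONDITION & SPEC =====
def Spec_resolve_mt5_symbol_py (requested_symbol : String) (available : List String) (out : Option String) : Prop := out = resolve_mt5_symbol_py_alt requested_symbol available
instance (requested_symbol : String) (available : List String) (out : Option String) : Decidable (Spec_resolve_mt5_symbol_py requested_symbol available out) := by unfold Spec_resolve_mt5_symbol_py; infer_instance

-- ===== CLAIM (what is proved, stated in full; the proofs are below) =====
def Claim_equal_resolve_mt5_symbol_py : Prop := ∀ (requested_symbol : String) (available : List String), Dom_resolve_mt5_symbol_py requested_symbol available → Spec_resolve_mt5_symbol_py requested_symbol available (resolve_mt5_symbol_py requested_symbol available)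

-- ===== LEMMAS AND PROOFS =====

-- proof-side notions: 'first minimum' of the key over the list, and combination with priority to the left
def pvInit (q s : String) : Option ((Nat × Int) × String) :=
  match pvKey q s with
  | none => none
  | some k => some (k, s)

def pvMinOpt (b r : Option ((Nat × Int) × String)) : Option ((Nat × Int) × String) :=
  match b, r with
  | none, r => r
  | some x, none => some x
  | some (bk, bs), some (mk, m) => if pvLexLt mk bk then some (mk, m) else some (bk, bs)

def pvFirstMin (q : String) : List String → Option ((Nat × Int) × String)
  | [] => none
  | s :: t => pvMinOpt (pvInit q s) (pvFirstMin q t)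

-- first element of minimal length (what sorted(key=len)[0] returns)
def pvMinLenF : List String → Option String
  | [] => none
  | s :: t =>
    match pvMinLenF t with
    | none => some s
    | some m => if PySem.Str.len m < PySem.Str.len s then some m else some s

-- basic facts about strings and keys
lemma pv_len_upper (s : String) : PySem.Str.len (PySem.Str.upper s) = PySem.Str.len s := by
  simp [PySem.Str.len_eq, PySem.Str.toList_upper, PySem.Chars.upper]

lemma pv_E_to_P (q s : String) (h : PySem.Str.upper s = q) :
    PySem.Str.startswith (PySem.Str.upper s) q = true := by
  rw [h, PySem.Str.startswith_eq, PySem.Chars.startswith_iff]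

lemma pv_P_to_C (q s : String) (h : PySem.Str.startswith (PySem.Str.upper s) q = true) :
    PySem.Str.isIn q (PySem.Str.upper s) = true := by
  rw [PySem.Str.startswith_eq, PySem.Chars.startswith_iff] at h
  rw [PySem.Str.isIn_eq, PySem.Chars.isIn_iff_infix]
  exact h.isInfix

lemma pvKey_snd (q s : String) (k : Nat × Int) (h : pvKey q s = some k) : k.2 = PySem.Str.len s := by
  unfold pvKey at h
  dsimp only at h
  split_ifs at h
  all_goals (injection h with h2; subst h2; simp [PySem.Str.len_eq])

lemma pvKey_fst_le (q s : String) (k : Nat × Int) (h : pvKey q s = some k) : k.1 ≤ 2 := by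
  unfold pvKey at h
  dsimp only at h
  split_ifs at h
  all_goals (injection h with h2; subst h2; norm_num)

lemma pvKey_zero (q s : String) (k : Nat × Int) (h : pvKey q s = some k) (h0 : k.1 = 0) :
    PySem.Str.upper s = q := by
  unfold pvKey at h
  dsimp only at h
  split_ifs at h
  all_goals (injection h with h2; subst h2
             first
               | exact (by simpa using ‹(PySem.Str.upper s == q) = true›)
               | exact absurd h0 (by norm_num))

lemma pvKey_le_one_P (q s : String) (k : Nat × Int) (h : pvKey q s = some k) (h1 : k.1 ≤ 1) :
    PySem.Str.startswith (PySem.Str.upper s) q = true := by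
  unfold pvKey at h
  dsimp only at h
  split_ifs at h with hE hP hC
  · exact pv_E_to_P q s (by simpa using hE)
  · exact hP
  · injection h with h2; subst h2; exact absurd h1 (by norm_num)


lemma pvKey_of_E (q s : String) (h : PySem.Str.upper s = q) :
    pvKey q s = some (0, PySem.Str.len s) := by
  simp [pvKey, h]

lemma pvKey_of_P (q s : String) (hne : ¬ PySem.Str.upper s = q)
    (h : PySem.Str.startswith (PySem.Str.upper s) q = true) :
    pvKey q s = some (1, PySem.Str.len s) := by
  have h' := h
  rw [PySem.Str.startswith_eq, PySem.Str.toList_upper] at h'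
  simp [pvKey, hne, h']

lemma pvKey_of_C (q s : String) (hne : ¬ PySem.Str.upper s = q)
    (hp : ¬ PySem.Str.startswith (PySem.Str.upper s) q = true)
    (h : PySem.Str.isIn q (PySem.Str.upper s) = true) :
    pvKey q s = some (2, PySem.Str.len s) := by
  have hp' := hp
  have h' := h
  rw [PySem.Str.startswith_eq, PySem.Str.toList_upper] at hp'
  rw [PySem.Str.isIn_eq, PySem.Str.toList_upper] at h'
  simp [pvKey, hne, hp', h']

lemma pvKey_of_none (q s : String) (hc : ¬ PySem.Str.isIn q (PySem.Str.upper s) = true) :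
    pvKey q s = none := by
  have hp : ¬ PySem.Str.startswith (PySem.Str.upper s) q = true := fun hP => hc (pv_P_to_C q s hP)
  have he : ¬ PySem.Str.upper s = q := fun hE => hp (pv_E_to_P q s hE)
  have hc' := hc
  rw [PySem.Str.isIn_eq, PySem.Str.toList_upper] at hc'
  rw [PySem.Str.startswith_eq, PySem.Str.toList_upper] at hp
  simp [pvKey, he, hp, hc']

lemma pvKey_exact_len (q s : String) (h : PySem.Str.upper s = q) :
    PySem.Str.len s = PySem.Str.len q := by
  rw [← pv_len_upper s, h]

-- pvFirstMin structure
lemma pvFirstMin_eq_none_iff (q : String) (l : List String) :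
    pvFirstMin q l = none ↔ ∀ s ∈ l, pvKey q s = none := by
  induction l with
  | nil => simp [pvFirstMin]
  | cons a t ih =>
    cases hk : pvKey q a with
    | none =>
      simp only [pvFirstMin, pvInit, hk]
      simp [pvMinOpt, ih, hk]
    | some ka =>
      simp only [pvFirstMin, pvInit, hk]
      constructor
      · intro h
        exfalso
        cases hft : pvFirstMin q t with
        | none => rw [hft] at h; simp [pvMinOpt] at h
        | some p =>
          obtain ⟨pk, pm⟩ := p
          rw [hft] at h
          simp only [pvMinOpt] at h
          split_ifs at h <;> simp at h
      · intro h
        exact absurd hk (by simp [h a (List.mem_cons_self)])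

lemma pvFirstMin_mem (q : String) (l : List String) (mk : Nat × Int) (m : String)
    (h : pvFirstMin q l = some (mk, m)) : m ∈ l ∧ pvKey q m = some mk := by
  induction l generalizing mk m with
  | nil => simp [pvFirstMin] at h
  | cons a t ih =>
    cases hk : pvKey q a with
    | none =>
      rw [pvFirstMin, pvInit, hk] at h
      simp only [pvMinOpt] at h
      obtain ⟨hm, hkey⟩ := ih _ _ h
      exact ⟨List.mem_cons_of_mem a hm, hkey⟩
    | some ka =>
      rw [pvFirstMin, pvInit, hk] at h
      cases hft : pvFirstMin q t with
      | none =>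
        rw [hft] at h
        simp only [pvMinOpt, Option.some.injEq, Prod.mk.injEq] at h
        obtain ⟨rfl, rfl⟩ := h
        exact ⟨List.mem_cons_self, hk⟩
      | some p =>
        obtain ⟨pk, pm⟩ := p
        rw [hft] at h
        simp only [pvMinOpt] at h
        split_ifs at h <;>
          simp only [Option.some.injEq, Prod.mk.injEq] at h <;>
          obtain ⟨rfl, rfl⟩ := h
        · obtain ⟨hm, hkey⟩ := ih _ _ hft
          exact ⟨List.mem_cons_of_mem a hm, hkey⟩
        · exact ⟨List.mem_cons_self, hk⟩

lemma pvFirstMin_min (q : String) (l : List String) (mk : Nat × Int) (m : String)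
    (h : pvFirstMin q l = some (mk, m)) :
    ∀ y ∈ l, ∀ k, pvKey q y = some k → pvLexLt k mk = false := by
  induction l generalizing mk m with
  | nil => simp [pvFirstMin] at h
  | cons a t ih =>
    intro y hy k hky
    cases hk : pvKey q a with
    | none =>
      rw [pvFirstMin, pvInit, hk] at h
      simp only [pvMinOpt] at h
      rcases List.mem_cons.mp hy with rfl | hyt
      · rw [hk] at hky; exact absurd hky (by simp)
      · exact ih _ _ h y hyt k hky
    | some ka =>
      rw [pvFirstMin, pvInit, hk] at h
      cases hft : pvFirstMin q t with
      | none =>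
        rw [hft] at h
        simp only [pvMinOpt, Option.some.injEq, Prod.mk.injEq] at h
        obtain ⟨rfl, rfl⟩ := h
        rcases List.mem_cons.mp hy with rfl | hyt
        · rw [hk] at hky
          injection hky with hky
          subst hky
          simp [pvLexLt]
        · have := (pvFirstMin_eq_none_iff q t).mp hft y hyt
          rw [this] at hky
          exact absurd hky (by simp)
      | some p =>
        obtain ⟨pk, pm⟩ := p
        rw [hft] at h
        simp only [pvMinOpt] at h
        split_ifs at h with hlt <;>
          simp only [Option.some.injEq, Prod.mk.injEq] at h <;>
          obtain ⟨rfl, rfl⟩ := h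
        · rcases List.mem_cons.mp hy with rfl | hyt
          · rw [hk] at hky
            injection hky with hky
            subst hky
            simp only [pvLexLt, decide_eq_true_eq] at hlt
            simp only [pvLexLt, decide_eq_false_iff_not]
            omega
          · exact ih _ _ hft y hyt k hky
        · rcases List.mem_cons.mp hy with rfl | hyt
          · rw [hk] at hky
            injection hky with hky
            subst hky
            simp [pvLexLt]
          · have h1 := ih _ _ hft y hyt k hky
            simp only [pvLexLt, decide_eq_true_eq, decide_eq_false_iff_not] at hlt h1 ⊢
            omega

-- the single-pass fold computes the first minimum
lemma pvBestStep_eq (q : String) (b : Option ((Nat × Int) × String)) (s : String) :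
    pvBestStep q b s = pvMinOpt b (pvInit q s) := by
  cases hk : pvKey q s with
  | none => cases b with
    | none => simp [pvBestStep, pvInit, pvMinOpt, hk]
    | some x => obtain ⟨bk, bs⟩ := x; simp [pvBestStep, pvInit, pvMinOpt, hk]
  | some k => cases b with
    | none => simp [pvBestStep, pvInit, pvMinOpt, hk]
    | some x => obtain ⟨bk, bs⟩ := x; simp [pvBestStep, pvInit, pvMinOpt, hk]

lemma pvMinOpt_assoc (x y z : Option ((Nat × Int) × String)) :
    pvMinOpt (pvMinOpt x y) z = pvMinOpt x (pvMinOpt y z) := by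
  rcases x with _ | ⟨⟨xk, xs⟩⟩ <;> rcases y with _ | ⟨⟨yk, ys⟩⟩ <;> rcases z with _ | ⟨⟨zk, zs⟩⟩ <;>
    simp only [pvMinOpt] <;>
    split_ifs <;>
    simp_all only [pvMinOpt, pvLexLt, decide_eq_true_eq, decide_eq_false_iff_not] <;>
    first | rfl | (split_ifs <;> simp_all <;> omega) | omega | (exfalso; omega)

lemma pvFoldl_best (q : String) (l : List String) (b : Option ((Nat × Int) × String)) :
    l.foldl (pvBestStep q) b = pvMinOpt b (pvFirstMin q l) := by
  induction l generalizing b with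
  | nil =>
    cases b with
    | none => rfl
    | some x => rfl
  | cons s t ih =>
    rw [List.foldl_cons, ih, pvBestStep_eq, pvFirstMin, pvMinOpt_assoc]

-- sorted-by-length head is the first element of minimal length
lemma pvMinLenF_concat (l : List String) (x : String) :
    pvMinLenF (l ++ [x]) =
      match pvMinLenF l with
      | none => some x
      | some m => if PySem.Str.len x < PySem.Str.len m then some x else some m := by
  induction l with
  | nil => simp [pvMinLenF]
  | cons s t ih =>
    rw [List.cons_append, pvMinLenF, ih, pvMinLenF]
    cases hft : pvMinLenF t with
    | none => simp
    | some m =>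
      simp only
      split_ifs <;> simp only [] <;> split_ifs <;> first | rfl | omega

lemma pvMinLenF_ne_none (l : List String) (h : l ≠ []) : pvMinLenF l ≠ none := by
  cases l with
  | nil => exact absurd rfl h
  | cons s t =>
    rw [pvMinLenF]
    cases pvMinLenF t with
    | none => simp
    | some m =>
      dsimp only
      split_ifs <;> simp

lemma pvSorted_head (l : List String) :
    (PySem.List.sorted l (fun s => PySem.Str.len s)).head? = pvMinLenF l := by
  induction l using List.reverseRecOn with
  | nil =>
    rw [PySem.List.sorted_eq_foldl_insertBy]
    rfl
  | append_singleton l x ih =>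
    have hs : PySem.List.sorted (l ++ [x]) (fun s => PySem.Str.len s) =
        PySem.List.insertBy (fun a b => decide (PySem.Str.len a < PySem.Str.len b)) x
          (PySem.List.sorted l (fun s => PySem.Str.len s)) := by
      rw [PySem.List.sorted_eq_foldl_insertBy, PySem.List.sorted_eq_foldl_insertBy,
        List.foldl_append, List.foldl_cons, List.foldl_nil]
    rw [hs, pvMinLenF_concat]
    cases hsl : PySem.List.sorted l (fun s => PySem.Str.len s) with
    | nil =>
      have hl : l = [] := (PySem.List.sorted_eq_nil_iff l _ false).mp hsl
      subst hl
      rfl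
    | cons y ys =>
      rw [hsl] at ih
      rw [← ih]
      simp only [List.head?_cons, PySem.List.insertBy]
      split_ifs <;> simp_all <;> omega

-- the three phases of A against pvFirstMin
lemma pvFM_exact (q : String) (l : List String) (s : String)
    (h : l.find? (fun s => PySem.Str.upper s == q) = some s) :
    (pvFirstMin q l).map (fun p => p.2) = some s := by
  induction l with
  | nil => simp at h
  | cons a t ih =>
    by_cases hE : (PySem.Str.upper a == q) = true
    · rw [List.find?_cons_of_pos (p := fun s => PySem.Str.upper s == q) hE] at h
      obtain rfl : a = s := by injection h
      have hEa : PySem.Str.upper a = q := by simpa using hE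
      rw [pvFirstMin, pvInit, pvKey_of_E q a hEa]
      cases hft : pvFirstMin q t with
      | none => simp [pvMinOpt]
      | some p =>
        obtain ⟨mk, m⟩ := p
        obtain ⟨hmem, hkm⟩ := pvFirstMin_mem q t mk m hft
        have hmk2 := pvKey_snd q m mk hkm
        have hlt : pvLexLt mk (0, PySem.Str.len a) = false := by
          by_cases h0 : mk.1 = 0
          · have hEm := pvKey_zero q m mk hkm h0
            have hlm := pvKey_exact_len q m hEm
            have hla := pvKey_exact_len q a hEa
            simp only [pvLexLt, decide_eq_false_iff_not]
            omega
          · simp only [pvLexLt, decide_eq_false_iff_not]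
            omega
        simp [PySem.Str.len_eq] at hlt
        simp [pvMinOpt, hlt]
    · rw [List.find?_cons_of_neg (p := fun s => PySem.Str.upper s == q) hE] at h
      rw [pvFirstMin, pvInit]
      cases hk : pvKey q a with
      | none =>
        have := ih h
        cases hft : pvFirstMin q t with
        | none => rw [hft] at this; simp at this
        | some p => rw [hft] at this; simpa [pvMinOpt] using this
      | some ka =>
        have hka1 : 1 ≤ ka.1 := by
          rcases Nat.eq_zero_or_pos ka.1 with h0 | h1
          · exact absurd (by simpa using pvKey_zero q a ka hk h0) hE
          · exact h1
        cases hft : pvFirstMin q t with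
        | none =>
          have := ih h
          rw [hft] at this
          simp at this
        | some p =>
          obtain ⟨mk, m⟩ := p
          have hms : m = s := by
            have := ih h
            rw [hft] at this
            simpa using this
          subst hms
          have hEs : PySem.Str.upper m = q := by simpa using List.find?_some h
          have hkm := (pvFirstMin_mem q t mk m hft).2
          rw [pvKey_of_E q m hEs] at hkm
          injection hkm with hkm
          have hlt : pvLexLt mk ka = true := by
            rw [← hkm]
            simp only [pvLexLt, decide_eq_true_eq]
            omega
          simp [pvMinOpt, hlt]

lemma pvFM_prefix (q : String) (l : List String)
    (h : l.find? (fun s => PySem.Str.upper s == q) = none)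
    (hsw : l.filter (fun s => PySem.Str.startswith (PySem.Str.upper s) q) ≠ []) :
    (pvFirstMin q l).map (fun p => p.2) =
      pvMinLenF (l.filter (fun s => PySem.Str.startswith (PySem.Str.upper s) q)) := by
  induction l with
  | nil => simp at hsw
  | cons a t ih =>
    have hNEa : ¬ (PySem.Str.upper a == q) = true := by
      intro hE
      rw [List.find?_cons_of_pos (p := fun s => PySem.Str.upper s == q) hE] at h
      exact absurd h (by simp)
    have hEa : ¬ PySem.Str.upper a = q := by simpa using hNEa
    rw [List.find?_cons_of_neg (p := fun s => PySem.Str.upper s == q) hNEa] at h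
    have hNEt : ∀ y ∈ t, ¬ PySem.Str.upper y = q := by
      intro y hy hEy
      have := List.find?_eq_none.mp h y hy
      simp at this
      exact this hEy
    by_cases hPa : PySem.Str.startswith (PySem.Str.upper a) q = true
    · rw [List.filter_cons_of_pos (p := fun s => PySem.Str.startswith (PySem.Str.upper s) q) hPa]
      rw [pvFirstMin, pvInit, pvKey_of_P q a hEa hPa]
      cases hft : pvFirstMin q t with
      | none =>
        have hall := (pvFirstMin_eq_none_iff q t).mp hft
        have hfe : t.filter (fun s => PySem.Str.startswith (PySem.Str.upper s) q) = [] := by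
          rw [List.filter_eq_nil_iff]
          intro y hy hPy
          refine absurd (hall y hy) ?_
          by_cases hEy : PySem.Str.upper y = q
          · rw [pvKey_of_E q y hEy]; simp
          · rw [pvKey_of_P q y hEy hPy]; simp
        rw [hfe]
        simp [pvMinOpt, pvMinLenF]
      | some p =>
        obtain ⟨mk, m⟩ := p
        obtain ⟨hmem, hkm⟩ := pvFirstMin_mem q t mk m hft
        have hmk1 : 1 ≤ mk.1 := by
          rcases Nat.eq_zero_or_pos mk.1 with h0 | h1
          · exact absurd (pvKey_zero q m mk hkm h0) (hNEt m hmem)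
          · exact h1
        by_cases hm1 : mk.1 = 1
        · have hPm := pvKey_le_one_P q m mk hkm (by omega)
          have hfne : t.filter (fun s => PySem.Str.startswith (PySem.Str.upper s) q) ≠ [] := by
            intro hnil
            exact absurd hPm (List.filter_eq_nil_iff.mp hnil m hmem)
          have iht := ih h hfne
          rw [hft] at iht
          have hmk : mk = (1, PySem.Str.len m) := by
            have hx := pvKey_of_P q m (hNEt m hmem) hPm
            rw [hkm] at hx
            injection hx
          subst hmk
          rw [pvMinLenF, ← iht]
          simp only [pvMinOpt, Option.map_some]
          split_ifs <;> simp_all [pvLexLt] <;> omega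
        · have hm2 : mk.1 = 2 := by
            have := pvKey_fst_le q m mk hkm
            omega
          have hfe : t.filter (fun s => PySem.Str.startswith (PySem.Str.upper s) q) = [] := by
            rw [List.filter_eq_nil_iff]
            intro y hy hPy
            have hky := pvKey_of_P q y (hNEt y hy) hPy
            have := pvFirstMin_min q t mk m hft y hy _ hky
            simp only [pvLexLt, decide_eq_false_iff_not] at this
            omega
          rw [hfe]
          have hlt : pvLexLt mk (1, PySem.Str.len a) = false := by
            simp only [pvLexLt, decide_eq_false_iff_not]
            omega
          simp [PySem.Str.len_eq] at hlt
          simp [pvMinOpt, hlt, pvMinLenF]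
    · have hswt : t.filter (fun s => PySem.Str.startswith (PySem.Str.upper s) q) ≠ [] := by
        rw [List.filter_cons_of_neg (p := fun s => PySem.Str.startswith (PySem.Str.upper s) q) hPa] at hsw
        exact hsw
      have iht := ih h hswt
      rw [List.filter_cons_of_neg (p := fun s => PySem.Str.startswith (PySem.Str.upper s) q) hPa]
      cases hft : pvFirstMin q t with
      | none =>
        rw [hft] at iht
        exact absurd iht.symm (pvMinLenF_ne_none _ hswt)
      | some p =>
        obtain ⟨mk, m⟩ := p
        obtain ⟨hmem, hkm⟩ := pvFirstMin_mem q t mk m hft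
        obtain ⟨w, hw⟩ := List.exists_mem_of_ne_nil _ hswt
        have hwt : w ∈ t := List.mem_of_mem_filter hw
        have hPw : PySem.Str.startswith (PySem.Str.upper w) q = true := (List.mem_filter.mp hw).2
        have hkw := pvKey_of_P q w (hNEt w hwt) hPw
        have hmin := pvFirstMin_min q t mk m hft w hwt _ hkw
        have hmk1 : mk.1 ≤ 1 := by
          simp only [pvLexLt, decide_eq_false_iff_not] at hmin
          omega
        rw [pvFirstMin, pvInit]
        cases hk : pvKey q a with
        | none =>
          rw [hft] at iht ⊢
          simpa [pvMinOpt] using iht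
        | some ka =>
          have hka2 : ka.1 = 2 := by
            have hle := pvKey_fst_le q a ka hk
            by_contra hne
            exact hPa (pvKey_le_one_P q a ka hk (by omega))
          have hlt : pvLexLt mk ka = true := by
            simp only [pvLexLt, decide_eq_true_eq]
            omega
          rw [hft] at iht ⊢
          simpa [pvMinOpt, hlt] using iht

lemma pvFM_contains (q : String) (l : List String)
    (h : l.find? (fun s => PySem.Str.upper s == q) = none)
    (hsw : l.filter (fun s => PySem.Str.startswith (PySem.Str.upper s) q) = []) :
    (pvFirstMin q l).map (fun p => p.2) =
      pvMinLenF (l.filter (fun s => PySem.Str.isIn q (PySem.Str.upper s))) := by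
  induction l with
  | nil => simp [pvFirstMin, pvMinLenF]
  | cons a t ih =>
    have hNEa : ¬ (PySem.Str.upper a == q) = true := by
      intro hE
      rw [List.find?_cons_of_pos (p := fun s => PySem.Str.upper s == q) hE] at h
      exact absurd h (by simp)
    have hEa : ¬ PySem.Str.upper a = q := by simpa using hNEa
    rw [List.find?_cons_of_neg (p := fun s => PySem.Str.upper s == q) hNEa] at h
    have hNEt : ∀ y ∈ t, ¬ PySem.Str.upper y = q := by
      intro y hy hEy
      have := List.find?_eq_none.mp h y hy
      simp at this
      exact this hEy
    have hPa : ¬ PySem.Str.startswith (PySem.Str.upper a) q = true := by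
      intro hP
      rw [List.filter_cons_of_pos (p := fun s => PySem.Str.startswith (PySem.Str.upper s) q) hP] at hsw
      exact absurd hsw (by simp)
    have hswt : t.filter (fun s => PySem.Str.startswith (PySem.Str.upper s) q) = [] := by
      rw [List.filter_cons_of_neg (p := fun s => PySem.Str.startswith (PySem.Str.upper s) q) hPa] at hsw
      exact hsw
    have hNPt : ∀ y ∈ t, ¬ PySem.Str.startswith (PySem.Str.upper y) q = true :=
      List.filter_eq_nil_iff.mp hswt
    have iht := ih h hswt
    by_cases hCa : PySem.Str.isIn q (PySem.Str.upper a) = true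
    · rw [List.filter_cons_of_pos (p := fun s => PySem.Str.isIn q (PySem.Str.upper s)) hCa]
      rw [pvFirstMin, pvInit, pvKey_of_C q a hEa hPa hCa]
      cases hft : pvFirstMin q t with
      | none =>
        have hall := (pvFirstMin_eq_none_iff q t).mp hft
        have hfe : t.filter (fun s => PySem.Str.isIn q (PySem.Str.upper s)) = [] := by
          rw [List.filter_eq_nil_iff]
          intro y hy hCy
          refine absurd (hall y hy) ?_
          rw [pvKey_of_C q y (hNEt y hy) (hNPt y hy) hCy]
          simp
        rw [hfe]
        simp [pvMinOpt, pvMinLenF]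
      | some p =>
        obtain ⟨mk, m⟩ := p
        obtain ⟨hmem, hkm⟩ := pvFirstMin_mem q t mk m hft
        have hCm : PySem.Str.isIn q (PySem.Str.upper m) = true := by
          by_contra hC
          rw [pvKey_of_none q m hC] at hkm
          exact absurd hkm (by simp)
        have hmk : mk = (2, PySem.Str.len m) := by
          have hx := pvKey_of_C q m (hNEt m hmem) (hNPt m hmem) hCm
          rw [hkm] at hx
          injection hx
        subst hmk
        rw [hft] at iht
        rw [pvMinLenF, ← iht]
        simp only [pvMinOpt, Option.map_some]
        split_ifs <;> simp_all [pvLexLt] <;> omega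
    · rw [List.filter_cons_of_neg (p := fun s => PySem.Str.isIn q (PySem.Str.upper s)) hCa]
      rw [pvFirstMin, pvInit, pvKey_of_none q a hCa]
      cases hft : pvFirstMin q t with
      | none =>
        rw [hft] at iht
        simpa [pvMinOpt] using iht
      | some p =>
        rw [hft] at iht
        simpa [pvMinOpt] using iht

lemma pvBody_eq (q : String) (l : List String) :
    pvResolveBody q l = (pvFirstMin q l).map (fun p => p.2) := by
  unfold pvResolveBody
  cases hf : l.find? (fun s => PySem.Str.upper s == q) with
  | some s => exact (pvFM_exact q l s hf).symm
  | none =>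
    simp only
    by_cases hsw : l.filter (fun s => PySem.Str.startswith (PySem.Str.upper s) q) = []
    · by_cases hct : l.filter (fun s => PySem.Str.isIn q (PySem.Str.upper s)) = []
      · rw [if_neg (fun hne => hne hsw), if_neg (fun hne => hne hct),
          pvFM_contains q l hf hsw, hct]
        rfl
      · rw [if_neg (fun hne => hne hsw), if_pos hct, pvSorted_head,
          pvFM_contains q l hf hsw]
    · rw [if_pos hsw, pvSorted_head, pvFM_prefix q l hf hsw]

-- ===== VERDICT (by name: the statement is the Claim_ definition above) =====
theorem resolve_mt5_symbol_py_spec : Claim_equal_resolve_mt5_symbol_py := by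
  intro requested_symbol available _
  unfold Spec_resolve_mt5_symbol_py resolve_mt5_symbol_py resolve_mt5_symbol_py_alt
  by_cases hq : PySem.Str.strip requested_symbol = ""
  · simp [hq]
  · simp only [hq, pvBody_eq, pvFoldl_best]
    cases pvFirstMin (PySem.Str.upper (PySem.Str.strip requested_symbol)) available with
    | none => rfl
    | some p => cases p with | mk k s => rfl
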